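-- pv_equiv track=rewrite | github.com/rencitizen/MuscleFormAnalyzer | backend/services/mediapipe_service.py | _deduplicate_feedback
-- ===== SOURCE A (Python) =====
-- from typing import Dict, List, Optional, Tuple, Union
--
-- def _deduplicate_feedback(feedback_list: List[Dict]) -> List[Dict]:
--     """Remove duplicate feedback messages and prioritize by importance"""
--     seen_messages = set()
--     unique_feedback = []
--
--     # Sort by priority (critical first)
--     priority_order = {'critical': 0, 'warning': 1, 'info': 2, 'positive': 3}
--     sorted_feedback = sorted(
--         feedback_list,
--         key=lambda x: priority_order.get(x.get('priority', 'info'), 2)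
--     )
--
--     for item in sorted_feedback:
--         message = item.get('message', '')
--         if message not in seen_messages:
--             seen_messages.add(message)
--             unique_feedback.append(item)
--
--     return unique_feedback[:10]  # Limit to top 10 feedback items
-- ===== SOURCE B (Python) =====
-- def _deduplicate_feedback(feedback_list):
--     """Remove duplicate feedback messages and prioritize by importance.
--
--     Bucket split instead of sorted(): since there are only four priority ranks,
--     append each item to its rank's bucket, then concatenate the buckets --
--     this reproduces the stable priority order without a comparison sort.
--     """
--     priority_order = {'critical': 0, 'warning': 1, 'info': 2, 'positive': 3}
--     buckets = ([], [], [], [])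
--     for item in feedback_list:
--         buckets[priority_order.get(item.get('priority', 'info'), 2)].append(item)
--
--     seen_messages = set()
--     unique_feedback = []
--     for item in buckets[0] + buckets[1] + buckets[2] + buckets[3]:
--         message = item.get('message', '')
--         if message not in seen_messages:
--             seen_messages.add(message)
--             unique_feedback.append(item)
--
--     return unique_feedback[:10]
-- ===== Notes on version B (the rewrite author's own statement) =====
-- stated objective: alternative
-- what changed: Replaces the sorted() call with a single bucket-split pass over the four possible priority ranks, concatenating the buckets to reproduce the stable priority order before the same dedup-and-truncate step.
import Mathlib
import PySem

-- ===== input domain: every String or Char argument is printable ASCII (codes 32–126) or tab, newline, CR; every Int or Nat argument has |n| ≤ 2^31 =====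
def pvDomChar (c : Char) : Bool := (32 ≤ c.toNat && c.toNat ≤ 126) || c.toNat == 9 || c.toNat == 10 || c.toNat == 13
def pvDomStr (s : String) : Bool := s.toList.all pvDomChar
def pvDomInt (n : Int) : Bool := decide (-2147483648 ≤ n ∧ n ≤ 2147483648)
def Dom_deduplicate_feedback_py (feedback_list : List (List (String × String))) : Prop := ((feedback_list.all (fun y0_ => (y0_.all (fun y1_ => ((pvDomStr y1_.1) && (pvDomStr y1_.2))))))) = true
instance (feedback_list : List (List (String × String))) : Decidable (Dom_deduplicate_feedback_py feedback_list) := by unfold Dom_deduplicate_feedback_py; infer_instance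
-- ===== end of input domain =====

-- Alternative algorithm: B replaces sorted() by a bucket split over the four priority ranks
-- (concatenating the buckets reproduces the stable priority order); same dedup loop, first 10 kept.

-- ===== PORT A =====
-- priority_order.get(item.get('priority', 'info'), 2) — the sort key used by both Pythons
def pvRank (item : List (String × String)) : Int :=
  PySem.Dict.getD (PySem.Dict.mk [("critical", (0 : Int)), ("warning", 1), ("info", 2), ("positive", 3)])
    (PySem.Dict.getD (PySem.Dict.mk item) "priority" "info") 2

-- the shared dedup loop body: skip if message seen, else record message and append item
def pvDedupStep (st : PySem.Set String × List (List (String × String)))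
    (item : List (String × String)) : PySem.Set String × List (List (String × String)) :=
  let message := PySem.Dict.getD (PySem.Dict.mk item) "message" ""
  if PySem.Set.contains st.1 message then st
  else (PySem.Set.add st.1 message, st.2 ++ [item])

def deduplicate_feedback_py (feedback_list : List (List (String × String))) : List (List (String × String)) :=
  let sorted_feedback := PySem.List.sorted feedback_list (fun x => pvRank x)
  let res := sorted_feedback.foldl pvDedupStep ((PySem.Set.empty : PySem.Set String), [])
  PySem.List.slice res.2 none (some 10)

-- ===== PORT B =====
-- buckets[priority_order.get(item.get('priority','info'), 2)].append(item)
def pvBucketStep (b : List (List (String × String)) × List (List (String × String)) × List (List (String × String)) × List (List (String × String)))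
    (item : List (String × String)) :
    List (List (String × String)) × List (List (String × String)) × List (List (String × String)) × List (List (String × String)) :=
  let r := pvRank item
  if r = 0 then (b.1 ++ [item], b.2.1, b.2.2.1, b.2.2.2)
  else if r = 1 then (b.1, b.2.1 ++ [item], b.2.2.1, b.2.2.2)
  else if r = 2 then (b.1, b.2.1, b.2.2.1 ++ [item], b.2.2.2)
  else (b.1, b.2.1, b.2.2.1, b.2.2.2 ++ [item])

def deduplicate_feedback_py_alt (feedback_list : List (List (String × String))) : List (List (String × String)) :=
  let b := feedback_list.foldl pvBucketStep ([], [], [], [])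
  let stream := b.1 ++ b.2.1 ++ b.2.2.1 ++ b.2.2.2
  let res := stream.foldl pvDedupStep ((PySem.Set.empty : PySem.Set String), [])
  PySem.List.slice res.2 none (some 10)

-- ===== PRECONDITION & SPEC =====
def Spec_deduplicate_feedback_py (feedback_list : List (List (String × String))) (out : List (List (String × String))) : Prop := out = deduplicate_feedback_py_alt feedback_list
instance (feedback_list : List (List (String × String))) (out : List (List (String × String))) : Decidable (Spec_deduplicate_feedback_py feedback_list out) := by unfold Spec_deduplicate_feedback_py; infer_instance

-- ===== CLAIM (what is proved, stated in full; the proofs are below) =====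
def Claim_equal_deduplicate_feedback_py : Prop := ∀ (feedback_list : List (List (String × String))), Dom_deduplicate_feedback_py feedback_list → Spec_deduplicate_feedback_py feedback_list (deduplicate_feedback_py feedback_list)

-- ===== LEMMAS AND PROOFS =====

lemma pvRank_cases (x : List (String × String)) :
    pvRank x = 0 ∨ pvRank x = 1 ∨ pvRank x = 2 ∨ pvRank x = 3 := by
  unfold pvRank
  simp only [PySem.Dict.getD, PySem.Dict.get?_mk_cons]
  split_ifs <;> simp [PySem.Dict.get?]

-- the i-th bucket of xs
def pvF (i : Int) (xs : List (List (String × String))) : List (List (String × String)) :=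
  xs.filter (fun x => pvRank x == i)

lemma pvF_append (i : Int) (xs : List (List (String × String))) (x : List (String × String)) :
    pvF i (xs ++ [x]) = pvF i xs ++ (if pvRank x = i then [x] else []) := by
  by_cases hx : pvRank x = i <;> simp [pvF, List.filter_append, hx]

lemma mem_pvF {i : Int} {xs : List (List (String × String))} {y : List (String × String)}
    (h : y ∈ pvF i xs) : pvRank y = i := by
  simp [pvF, List.mem_filter] at h
  exact h.2

lemma insertBy_skip {α : Type} (before : α → α → Bool) (x : α) (l t : List α)
    (h : ∀ y ∈ l, before x y = false) :
    PySem.List.insertBy before x (l ++ t) = l ++ PySem.List.insertBy before x t := by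
  induction l with
  | nil => simp
  | cons a l ih =>
    have ha : before x a = false := h a (by simp)
    simp [PySem.List.insertBy, ha, ih (fun y hy => h y (by simp [hy]))]

lemma insertBy_front {α : Type} (before : α → α → Bool) (x : α) (t : List α)
    (h : ∀ y ∈ t, before x y = true) :
    PySem.List.insertBy before x t = x :: t := by
  cases t with
  | nil => rfl
  | cons a l => simp [PySem.List.insertBy, h a (by simp)]

lemma sorted_buckets (xs : List (List (String × String))) :
    PySem.List.sorted xs (fun x => pvRank x) = pvF 0 xs ++ pvF 1 xs ++ pvF 2 xs ++ pvF 3 xs := by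
  rw [PySem.List.sorted_eq_foldl_insertBy]
  induction xs using List.reverseRecOn with
  | nil => simp [pvF]
  | append_singleton xs x ih =>
    rw [List.foldl_append, ih]
    simp only [List.foldl_cons, List.foldl_nil, pvF_append, List.append_assoc]
    rcases pvRank_cases x with h | h | h | h <;> simp only [h] <;> norm_num
    · rw [insertBy_skip _ x (pvF 0 xs) _ (fun y hy => by have := mem_pvF hy; simp [h, this]),
          insertBy_front _ _ _ (by
            intro y hy
            simp only [List.mem_append] at hy
            rcases hy with hy | hy | hy <;> · have := mem_pvF hy; simp [h, this])]
    · rw [insertBy_skip _ x (pvF 0 xs) _ (fun y hy => by have := mem_pvF hy; simp [h, this]),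
          insertBy_skip _ x (pvF 1 xs) _ (fun y hy => by have := mem_pvF hy; simp [h, this]),
          insertBy_front _ _ _ (by
            intro y hy
            simp only [List.mem_append] at hy
            rcases hy with hy | hy <;> · have := mem_pvF hy; simp [h, this])]
    · rw [insertBy_skip _ x (pvF 0 xs) _ (fun y hy => by have := mem_pvF hy; simp [h, this]),
          insertBy_skip _ x (pvF 1 xs) _ (fun y hy => by have := mem_pvF hy; simp [h, this]),
          insertBy_skip _ x (pvF 2 xs) _ (fun y hy => by have := mem_pvF hy; simp [h, this]),
          insertBy_front _ _ _ (fun y hy => by have := mem_pvF hy; simp [h, this])]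
    · rw [insertBy_skip _ x (pvF 0 xs) _ (fun y hy => by have := mem_pvF hy; simp [h, this]),
          insertBy_skip _ x (pvF 1 xs) _ (fun y hy => by have := mem_pvF hy; simp [h, this]),
          insertBy_skip _ x (pvF 2 xs) _ (fun y hy => by have := mem_pvF hy; simp [h, this]),
          PySem.List.insertBy_of_forall_not_before _ _ _
            (fun y hy => by have := mem_pvF hy; simp [h, this])]

lemma bucket_inv (xs : List (List (String × String)))
    (a b c d : List (List (String × String))) :
    xs.foldl pvBucketStep (a, b, c, d)
      = (a ++ pvF 0 xs, b ++ pvF 1 xs, c ++ pvF 2 xs, d ++ pvF 3 xs) := by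
  induction xs generalizing a b c d with
  | nil => simp [pvF]
  | cons x xs ih =>
    rcases pvRank_cases x with h | h | h | h <;>
      simp [pvBucketStep, h, ih, pvF]

-- ===== VERDICT (by name: the statement is the Claim_ definition above) =====
theorem deduplicate_feedback_py_spec : Claim_equal_deduplicate_feedback_py := by
  intro feedback_list _
  unfold Spec_deduplicate_feedback_py deduplicate_feedback_py deduplicate_feedback_py_alt
  rw [sorted_buckets, bucket_inv]
  simp
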